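-- pv_equiv track=rewrite | github.com/JessyColonval/Advent_of_code | 2024/Day_12/solution.py | divide_by_line
-- ===== SOURCE A (Python) =====
-- from typing import List, Tuple, Dict
--
-- def divide_by_line(indices: List[Tuple[int]]) -> Dict[int, List[Tuple[int]]]:
--     """
--     Separates a region according to its lines.
--
--     Parameters
--     ----------
--     indices : List[Tuple[int]]
--         A list of coordinates of similar plants that shares the same region.
--
--     Return
--     ------
--     Dict[int, List[Tuple[int]]]
--         A dictionnary that map a number of line in the garden with the
--         coordinates of every plant in the given region on this line.
--     """
--     result = {}
--     for plant in indices: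
--         x = plant[0]
--         if x not in result:
--             result[x] = []
--         result[x].append(plant)
--     return {
--         key: sorted(values, key=lambda t: t[1])
--         for key, values in result.items()
--     }
-- ===== SOURCE B (Python) =====
-- from typing import List, Tuple, Dict
--
-- def divide_by_line(indices: List[Tuple[int]]) -> Dict[int, List[Tuple[int]]]:
--     # One global stable sort by column, then a single grouping pass:
--     # each row bucket comes out already column-sorted, so no per-group sorting.
--     ordered = sorted(indices, key=lambda t: t[1])
--     result = {x: [] for x in dict.fromkeys(p[0] for p in indices)}
--     for plant in ordered:
--         result[plant[0]].append(plant)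
--     return result
-- ===== Notes on version B (the rewrite author's own statement) =====
-- stated objective: alternative
-- what changed: A groups plants row by row and then sorts every row bucket separately; B does one global stable sort of the whole list by column and a single grouping pass over pre-seeded row keys, so no per-bucket sorting is needed (sort-then-group instead of group-then-sort).
import Mathlib
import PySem

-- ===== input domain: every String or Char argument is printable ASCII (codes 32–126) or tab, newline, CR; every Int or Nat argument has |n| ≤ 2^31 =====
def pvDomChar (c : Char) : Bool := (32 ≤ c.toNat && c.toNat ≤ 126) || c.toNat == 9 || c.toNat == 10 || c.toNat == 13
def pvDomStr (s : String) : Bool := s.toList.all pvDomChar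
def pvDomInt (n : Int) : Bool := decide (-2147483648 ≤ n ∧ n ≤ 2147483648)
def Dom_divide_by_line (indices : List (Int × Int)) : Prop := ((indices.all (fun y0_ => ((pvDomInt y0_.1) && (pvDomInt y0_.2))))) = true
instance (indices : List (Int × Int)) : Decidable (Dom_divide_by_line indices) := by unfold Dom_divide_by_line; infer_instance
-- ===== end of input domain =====

-- B replaces A's group-then-sort-each-bucket by one global stable sort by column followed by a single
-- grouping pass over pre-seeded row keys (alternative decomposition; dict key order is preserved).

-- ===== PORT A =====
def divide_by_line (indices : List (Int × Int)) : List (Int × List (Int × Int)) :=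
  let result : PySem.Dict Int (List (Int × Int)) :=
    indices.foldl (fun result plant =>
      let x := plant.1
      let result := if result.contains x then result else result.insert x []
      -- result[x].append(plant)
      result.modify x [] (fun v => v ++ [plant])) PySem.Dict.empty
  -- {key: sorted(values, key=lambda t: t[1]) for key, values in result.items()}
  result.items.map (fun kv => (kv.1, PySem.List.sorted kv.2 (fun t => t.2) false))

-- ===== PORT B =====
def divide_by_line_alt (indices : List (Int × Int)) : List (Int × List (Int × Int)) :=
  -- ordered = sorted(indices, key=lambda t: t[1])
  let ordered := PySem.List.sorted indices (fun t => t.2) false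
  -- result = {x: [] for x in dict.fromkeys(p[0] for p in indices)}
  let result : PySem.Dict Int (List (Int × Int)) :=
    (PySem.List.dedup (indices.map (fun p => p.1))).foldl
      (fun d x => d.insert x []) PySem.Dict.empty
  -- for plant in ordered: result[plant[0]].append(plant)
  -- (modify is exact here: plant[0] is always a key of result, so no KeyError is possible)
  let result := ordered.foldl (fun d plant => d.modify plant.1 [] (fun v => v ++ [plant])) result
  result.items

-- ===== PRECONDITION & SPEC =====
def Spec_divide_by_line (indices : List (Int × Int)) (out : List (Int × List (Int × Int))) : Prop := out = divide_by_line_alt indices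
instance (indices : List (Int × Int)) (out : List (Int × List (Int × Int))) : Decidable (Spec_divide_by_line indices out) := by unfold Spec_divide_by_line; infer_instance

-- ===== CLAIM (what is proved, stated in full; the proofs are below) =====
def Claim_equal_divide_by_line : Prop := ∀ (indices : List (Int × Int)), Dom_divide_by_line indices → Spec_divide_by_line indices (divide_by_line indices)

-- ===== LEMMAS AND PROOFS =====

-- A's conditional "if x not in result: result[x] = []" before the append collapses into a single modify.
theorem pv_stepA_eq_modify (d : PySem.Dict Int (List (Int × Int))) (p : Int × Int) :
    ((if d.contains p.1 then d else d.insert p.1 []).modify p.1 [] (fun v => v ++ [p]))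
      = d.modify p.1 [] (fun v => v ++ [p]) := by
  by_cases h : d.contains p.1
  · simp [h]
  · have hg : d.getD p.1 [] = [] :=
      PySem.Dict.getD_of_not_contains d [] (by simpa using h)
    simp [h, PySem.Dict.modify, PySem.Dict.getD_insert_self, PySem.Dict.insert_insert_self, hg]

theorem pv_foldA_eq_foldMod (xs : List (Int × Int)) (d : PySem.Dict Int (List (Int × Int))) :
    xs.foldl (fun result plant =>
      (if result.contains plant.1 then result else result.insert plant.1 []).modify plant.1 []
        (fun v => v ++ [plant])) d
    = xs.foldl (fun d plant => d.modify plant.1 [] (fun v => v ++ [plant])) d := by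
  induction xs generalizing d with
  | nil => rfl
  | cons x xs ih =>
    simp only [List.foldl_cons]
    rw [pv_stepA_eq_modify, ih]

-- getD of the grouping fold: appends exactly the key's occurrences, in order.
theorem pv_getD_groupFold (xs : List (Int × Int)) (d : PySem.Dict Int (List (Int × Int))) (c : Int) :
    (xs.foldl (fun d plant => d.modify plant.1 [] (fun v => v ++ [plant])) d).getD c []
      = d.getD c [] ++ xs.filter (fun p => p.1 == c) := by
  induction xs generalizing d with
  | nil => simp
  | cons q xs ih =>
    simp only [List.foldl_cons, ih, PySem.Dict.getD_modify, List.filter_cons]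
    by_cases h : q.1 = c
    · simp [h]
    · simp [h, Ne.symm h]

-- keys of the grouping fold.
theorem pv_keys_groupFold (xs : List (Int × Int)) (d : PySem.Dict Int (List (Int × Int))) :
    (xs.foldl (fun d plant => d.modify plant.1 [] (fun v => v ++ [plant])) d).keys
      = PySem.Set.update d.keys (xs.map (fun p => p.1)) := by
  exact PySem.Dict.keys_foldl_modify_key xs (fun p => p.1) [] (fun _ p v => v ++ [p]) d

-- insertBy of an element the filter drops
theorem pv_filter_insertBy_neg {α : Type} (p : α → Bool) (bf : α → α → Bool) (x : α) (ys : List α)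
    (hx : p x = false) : (PySem.List.insertBy bf x ys).filter p = ys.filter p := by
  induction ys with
  | nil => simp [PySem.List.insertBy, hx]
  | cons y ys ih =>
    simp only [PySem.List.insertBy]
    by_cases h : bf x y
    · simp [h, hx]
    · by_cases hy : p y <;> simp [h, hy, ih]

theorem pv_insertBy_all_before {α : Type} (bf : α → α → Bool) (x : α) (zs : List α)
    (h : ∀ z ∈ zs, bf x z = true) : PySem.List.insertBy bf x zs = x :: zs := by
  cases zs with
  | nil => rfl
  | cons z zs => simp [PySem.List.insertBy, h z (by simp)]

-- insertBy of a kept element commutes with filter on a key-sorted list (stability).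
theorem pv_filter_insertBy_pos {α : Type} (key : α → Int) (p : α → Bool) (x : α) (ys : List α)
    (hx : p x = true) (hs : ys.Pairwise (fun a b => key a ≤ key b)) :
    (PySem.List.insertBy (fun a b => decide (key a < key b)) x ys).filter p
      = PySem.List.insertBy (fun a b => decide (key a < key b)) x (ys.filter p) := by
  induction ys with
  | nil => simp [PySem.List.insertBy, hx]
  | cons y ys ih =>
    rcases List.pairwise_cons.mp hs with ⟨hy, htl⟩
    simp only [PySem.List.insertBy]
    by_cases h : key x < key y
    · by_cases hpy : p y
      · simp [PySem.List.insertBy, h, hx, hpy]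
      · simp only [decide_eq_true_eq, h, if_pos, List.filter_cons, hx, hpy, Bool.false_eq_true]
        rw [pv_insertBy_all_before]
        intro z hz
        have hz' : z ∈ ys := List.mem_of_mem_filter hz
        simp only [decide_eq_true_eq]
        exact lt_of_lt_of_le h (hy z hz')
    · by_cases hpy : p y
      · simp [PySem.List.insertBy, h, hpy, ih htl]
      · simp [h, hpy, ih htl]

-- insertBy preserves key-sortedness.
theorem pv_insertBy_pairwise {α : Type} (key : α → Int) (x : α) (ys : List α)
    (hs : ys.Pairwise (fun a b => key a ≤ key b)) :
    (PySem.List.insertBy (fun a b => decide (key a < key b)) x ys).Pairwise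
      (fun a b => key a ≤ key b) := by
  induction ys with
  | nil => simp [PySem.List.insertBy]
  | cons y ys ih =>
    rcases List.pairwise_cons.mp hs with ⟨hy, htl⟩
    simp only [PySem.List.insertBy]
    by_cases h : key x < key y
    · rw [if_pos (by simpa using h)]
      refine List.pairwise_cons.mpr ⟨?_, hs⟩
      intro z hz
      rcases List.mem_cons.mp hz with hz | hz
      · exact le_of_lt (by simpa [hz] using h)
      · exact le_of_lt (lt_of_lt_of_le h (hy z hz))
    · rw [if_neg (by simpa using h)]
      refine List.pairwise_cons.mpr ⟨?_, ih htl⟩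
      intro z hz
      rcases (PySem.List.mem_insertBy _ _ _ _).mp hz with hz | hz
      · subst hz; exact le_of_not_gt (by simpa using h)
      · exact hy z hz

theorem pv_filter_foldl_insertBy {α : Type} (key : α → Int) (p : α → Bool) (xs acc : List α)
    (hs : acc.Pairwise (fun a b => key a ≤ key b)) :
    (xs.foldl (fun acc x => PySem.List.insertBy (fun a b => decide (key a < key b)) x acc) acc).filter p
      = (xs.filter p).foldl (fun acc x => PySem.List.insertBy (fun a b => decide (key a < key b)) x acc)
          (acc.filter p) := by
  induction xs generalizing acc with
  | nil => rfl
  | cons x xs ih =>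
    by_cases hx : p x
    · simp only [List.foldl_cons, List.filter_cons, hx, if_true]
      rw [ih _ (pv_insertBy_pairwise key x acc hs), pv_filter_insertBy_pos key p x acc hx hs]
    · rw [List.foldl_cons, ih _ (pv_insertBy_pairwise key x acc hs),
        pv_filter_insertBy_neg p _ x acc (by simpa using hx)]
      simp [hx]

-- STABILITY: filtering commutes with the stable sort.
theorem pv_filter_sorted {α : Type} (key : α → Int) (p : α → Bool) (xs : List α) :
    (PySem.List.sorted xs key false).filter p = PySem.List.sorted (xs.filter p) key false := by
  rw [PySem.List.sorted_eq_foldl_insertBy, PySem.List.sorted_eq_foldl_insertBy]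
  simpa using pv_filter_foldl_insertBy key p xs [] (by simp)

-- A's output: group keys in first-occurrence order, each group's occurrences sorted by column.
theorem pv_A_items (indices : List (Int × Int)) :
    divide_by_line indices
      = (PySem.List.dedup (indices.map (fun p => p.1))).map
          (fun k => (k, PySem.List.sorted (indices.filter (fun p => p.1 == k)) (fun t => t.2) false)) := by
  show (indices.foldl (fun result plant =>
      (if result.contains plant.1 then result else result.insert plant.1 []).modify plant.1 []
        (fun v => v ++ [plant])) PySem.Dict.empty).items.map
      (fun kv => (kv.1, PySem.List.sorted kv.2 (fun t => t.2) false)) = _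
  rw [pv_foldA_eq_foldMod]
  have hk : (indices.foldl (fun d plant => d.modify plant.1 [] (fun v => v ++ [plant]))
      (PySem.Dict.empty : PySem.Dict Int (List (Int × Int)))).keys
      = PySem.List.dedup (indices.map (fun p => p.1)) := by
    rw [pv_keys_groupFold]
    simp [PySem.Dict.keys_empty, PySem.Set.update_nil_left]
  have hnd : (indices.foldl (fun d plant => d.modify plant.1 [] (fun v => v ++ [plant]))
      (PySem.Dict.empty : PySem.Dict Int (List (Int × Int)))).keys.Nodup := by
    exact PySem.Dict.nodup_keys_foldl_modify_key indices (fun p => p.1) [] (fun _ p v => v ++ [p]) _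
      (by simp [PySem.Dict.keys_empty])
  rw [PySem.Dict.items_eq_map_keys _ hnd [], hk, List.map_map]
  refine List.map_congr_left (fun k _ => ?_)
  simp [pv_getD_groupFold, PySem.Dict.getD_empty]

-- B's output: the same keys, each group filtered out of the globally sorted list.
theorem pv_B_items (indices : List (Int × Int)) :
    divide_by_line_alt indices
      = (PySem.List.dedup (indices.map (fun p => p.1))).map
          (fun k => (k, (PySem.List.sorted indices (fun t => t.2) false).filter (fun p => p.1 == k))) := by
  show (((PySem.List.sorted indices (fun t => t.2) false).foldl
      (fun d plant => d.modify plant.1 [] (fun v => v ++ [plant]))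
      ((PySem.List.dedup (indices.map (fun p => p.1))).foldl
        (fun d x => d.insert x []) PySem.Dict.empty)).items) = _
  have hinit : ((PySem.List.dedup (indices.map (fun p => p.1))).foldl
      (fun d x => d.insert x []) (PySem.Dict.empty : PySem.Dict Int (List (Int × Int)))).items
      = (PySem.List.dedup (indices.map (fun p => p.1))).map (fun k => (k, ([] : List (Int × Int)))) := by
    have h := PySem.Dict.items_foldl_insert_fresh (PySem.List.dedup (indices.map (fun p => p.1)))
      (fun x => x) (fun _ => ([] : List (Int × Int)))
      (PySem.Dict.empty : PySem.Dict Int (List (Int × Int)))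
      (by intro a _; simp [PySem.Dict.contains_empty])
      (by simp)
    simp at h
    exact h
  have hinitkeys : ((PySem.List.dedup (indices.map (fun p => p.1))).foldl
      (fun d x => d.insert x []) (PySem.Dict.empty : PySem.Dict Int (List (Int × Int)))).keys
      = PySem.List.dedup (indices.map (fun p => p.1)) := by
    show (((PySem.List.dedup (indices.map (fun p => p.1))).foldl
      (fun d x => d.insert x []) (PySem.Dict.empty : PySem.Dict Int (List (Int × Int)))).items.map (fun p => p.1)) = _
    rw [hinit, List.map_map]
    simp [Function.comp_def]
  have hk : (((PySem.List.sorted indices (fun t => t.2) false).foldl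
      (fun d plant => d.modify plant.1 [] (fun v => v ++ [plant]))
      ((PySem.List.dedup (indices.map (fun p => p.1))).foldl
        (fun d x => d.insert x []) PySem.Dict.empty)).keys)
      = PySem.List.dedup (indices.map (fun p => p.1)) := by
    rw [pv_keys_groupFold, hinitkeys, PySem.Set.update_eq_append_filter]
    have hnil : ((PySem.Set.ofList ((PySem.List.sorted indices (fun t => t.2) false).map (fun p => p.1))).filter
        (fun y => !(PySem.Set.contains (PySem.List.dedup (indices.map (fun p => p.1))) y))) = [] := by
      rw [List.filter_eq_nil_iff]
      intro y hy
      have hy' : y ∈ indices.map (fun p => p.1) := by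
        rcases List.mem_map.mp ((PySem.Set.mem_ofList _ _).mp hy) with ⟨q, hq, rfl⟩
        exact List.mem_map.mpr ⟨q, (PySem.List.mem_sorted _ _ _ _).mp hq, rfl⟩
      have hmem : y ∈ PySem.List.dedup (indices.map (fun p => p.1)) :=
        (PySem.List.mem_dedup _ _).mpr hy'

      intro hfalse
      simp [PySem.Set.contains] at hfalse
      rcases List.mem_map.mp hy' with ⟨⟨a, b⟩, hq, rfl⟩
      exact hfalse b hq
    rw [hnil, List.append_nil]
  have hnd : (((PySem.List.sorted indices (fun t => t.2) false).foldl
      (fun d plant => d.modify plant.1 [] (fun v => v ++ [plant]))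
      ((PySem.List.dedup (indices.map (fun p => p.1))).foldl
        (fun d x => d.insert x []) PySem.Dict.empty)).keys).Nodup := by
    refine PySem.Dict.nodup_keys_foldl_modify_key (β := Int × Int)
      (PySem.List.sorted indices (fun t => t.2) false) (fun p => p.1) [] (fun _ p v => v ++ [p]) _ ?_
    rw [hinitkeys]
    exact PySem.List.nodup_dedup _
  rw [PySem.Dict.items_eq_map_keys _ hnd [], hk]
  refine List.map_congr_left (fun k hkmem => ?_)
  rw [pv_getD_groupFold]
  have : ((PySem.List.dedup (indices.map (fun p => p.1))).foldl
      (fun d x => d.insert x []) (PySem.Dict.empty : PySem.Dict Int (List (Int × Int)))).getD k [] = [] := by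
    refine PySem.Dict.getD_of_mem_items _ ?_ (by rw [hinitkeys]; exact PySem.List.nodup_dedup _) []
    rw [hinit]
    exact List.mem_map.mpr ⟨k, hkmem, rfl⟩
  rw [this, List.nil_append]

-- ===== VERDICT (by name: the statement is the Claim_ definition above) =====
theorem divide_by_line_spec : Claim_equal_divide_by_line := by
  intro indices _
  unfold Spec_divide_by_line
  rw [pv_A_items, pv_B_items]
  refine List.map_congr_left (fun k _ => ?_)
  rw [← pv_filter_sorted]
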